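-- pv_equiv track=rewrite | github.com/Bhooomicka/AirMentor | audit-map/16-scripts/operator-dashboard.py | active_pass
-- ===== SOURCE A (Python) =====
-- def active_pass(sessions: list[dict[str, str]]) -> dict[str, str] | None:
--     live = [s for s in sessions if s.get("state") in {"running", "starting", "queued"} and s.get("pass_name") != "night-run-orchestrator" and s.get("pass_name") != "usage-refresh-orchestrator"]
--     if live:
--         live.sort(key=lambda item: (item.get("state") != "running", item.get("created_at", "")))
--         return live[0]
--     blocked = [s for s in sessions if s.get("state") in {"stale", "manual_action_required", "failed"} and s.get("pass_name") != "night-run-orchestrator" and s.get("pass_name") != "usage-refresh-orchestrator"]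
--     if not blocked:
--         return None
--     blocked.sort(key=lambda item: item.get("updated_at", ""), reverse=True)
--     return blocked[0]
-- ===== SOURCE B (Python) =====
-- def active_pass(sessions: list[dict[str, str]]) -> dict[str, str] | None:
--     best_live = None      # (key, session); key = (state != "running", created_at)
--     best_blocked = None   # (updated_at, session)
--     for s in sessions:
--         if s.get("pass_name") in ("night-run-orchestrator", "usage-refresh-orchestrator"):
--             continue
--         state = s.get("state")
--         if state in ("running", "starting", "queued"):
--             key = (state != "running", s.get("created_at", ""))
--             if best_live is None or key < best_live[0]:
--                 best_live = (key, s)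
--         elif state in ("stale", "manual_action_required", "failed"):
--             u = s.get("updated_at", "")
--             if best_blocked is None or best_blocked[0] < u:
--                 best_blocked = (u, s)
--     if best_live is not None:
--         return best_live[1]
--     if best_blocked is not None:
--         return best_blocked[1]
--     return None
-- ===== Notes on version B (the rewrite author's own statement) =====
-- stated objective: alternative
-- what changed: Replaced the two filter-then-stable-sort passes by a single fused scan over sessions that maintains a running best live candidate (first-wins lexicographic min on (state!='running', created_at)) and a running best blocked candidate (first-wins max on updated_at), picking live over blocked at the end; no intermediate lists and no sort.
import Mathlib
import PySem

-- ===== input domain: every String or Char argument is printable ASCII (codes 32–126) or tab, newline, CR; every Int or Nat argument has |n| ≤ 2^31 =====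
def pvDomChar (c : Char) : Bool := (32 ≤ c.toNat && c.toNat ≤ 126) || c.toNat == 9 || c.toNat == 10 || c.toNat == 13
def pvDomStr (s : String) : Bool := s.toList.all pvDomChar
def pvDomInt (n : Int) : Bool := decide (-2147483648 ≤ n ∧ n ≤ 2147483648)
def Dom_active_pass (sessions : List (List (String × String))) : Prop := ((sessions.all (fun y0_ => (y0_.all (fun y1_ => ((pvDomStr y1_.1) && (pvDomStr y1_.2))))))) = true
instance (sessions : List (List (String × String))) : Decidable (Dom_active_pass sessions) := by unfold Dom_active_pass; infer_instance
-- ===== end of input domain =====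

-- B replaces A's two filter+stable-sort passes by one fused scan keeping a running best
-- live and best blocked candidate (objective: alternative single-pass algorithm; return value only).

-- shared: s.get(k) on a dict given as an association list (first match)
def pvGet (s : List (String × String)) (k : String) : Option String :=
  PySem.Dict.get? (PySem.Dict.mk s) k

-- ===== PORT A =====
def liveA (s : List (String × String)) : Bool :=
  decide (pvGet s "state" = some "running" ∨ pvGet s "state" = some "starting" ∨ pvGet s "state" = some "queued")
    && decide (pvGet s "pass_name" ≠ some "night-run-orchestrator")
    && decide (pvGet s "pass_name" ≠ some "usage-refresh-orchestrator")

def blockedA (s : List (String × String)) : Bool :=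
  decide (pvGet s "state" = some "stale" ∨ pvGet s "state" = some "manual_action_required" ∨ pvGet s "state" = some "failed")
    && decide (pvGet s "pass_name" ≠ some "night-run-orchestrator")
    && decide (pvGet s "pass_name" ≠ some "usage-refresh-orchestrator")

def keyA1 (s : List (String × String)) : Bool := decide (pvGet s "state" ≠ some "running")
def keyA2 (s : List (String × String)) : String := (pvGet s "created_at").getD ""
def keyAU (s : List (String × String)) : String := (pvGet s "updated_at").getD ""

def active_pass (sessions : List (List (String × String))) : Option (List (String × String)) :=
  let live := sessions.filter liveA
  if !live.isEmpty then
    (PySem.List.sorted2 live keyA1 keyA2 false).head?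
  else
    let blocked := sessions.filter blockedA
    if blocked.isEmpty then none
    else (PySem.List.sorted blocked keyAU true).head?

-- ===== PORT B =====
def orchB (s : List (String × String)) : Bool :=
  pvGet s "pass_name" == some "night-run-orchestrator" || pvGet s "pass_name" == some "usage-refresh-orchestrator"

def isLiveSt (s : List (String × String)) : Bool :=
  pvGet s "state" == some "running" || pvGet s "state" == some "starting" || pvGet s "state" == some "queued"

def isBlockedSt (s : List (String × String)) : Bool :=
  pvGet s "state" == some "stale" || pvGet s "state" == some "manual_action_required" || pvGet s "state" == some "failed"

-- Python tuple '<' on (bool, str)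
def keyLtB (a b : Bool × String) : Bool := decide (a.1 < b.1) || (a.1 == b.1 && decide (a.2 < b.2))

def stepB (acc : Option ((Bool × String) × List (String × String)) × Option (String × List (String × String)))
    (s : List (String × String)) :
    Option ((Bool × String) × List (String × String)) × Option (String × List (String × String)) :=
  if orchB s then acc
  else if isLiveSt s then
    let key : Bool × String := (decide (pvGet s "state" ≠ some "running"), (pvGet s "created_at").getD "")
    (match acc.1 with
     | none => some (key, s)
     | some (bk, bs) => if keyLtB key bk then some (key, s) else some (bk, bs), acc.2)
  else if isBlockedSt s then
    let u := (pvGet s "updated_at").getD ""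
    (acc.1,
     match acc.2 with
     | none => some (u, s)
     | some (bu, bs) => if decide (bu < u) then some (u, s) else some (bu, bs))
  else acc

def active_pass_alt (sessions : List (List (String × String))) : Option (List (String × String)) :=
  let r := sessions.foldl stepB (none, none)
  match r.1 with
  | some (_, s) => some s
  | none =>
    match r.2 with
    | some (_, s) => some s
    | none => none

-- ===== PRECONDITION & SPEC =====
def Spec_active_pass (sessions : List (List (String × String))) (out : Option (List (String × String))) : Prop := out = active_pass_alt sessions
instance (sessions : List (List (String × String))) (out : Option (List (String × String))) : Decidable (Spec_active_pass sessions out) := by unfold Spec_active_pass; infer_instance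

-- ===== CLAIM (what is proved, stated in full; the proofs are below) =====
def Claim_equal_active_pass : Prop := ∀ (sessions : List (List (String × String))), Dom_active_pass sessions → Spec_active_pass sessions (active_pass sessions)

-- ===== LEMMAS AND PROOFS =====

-- first-wins extremal scan step (x replaces the best only if 'before x best')
def optMin {α : Type} (before : α → α → Bool) (o : Option α) (x : α) : Option α :=
  match o with
  | none => some x
  | some b => if before x b then some x else some b

-- A's comparison functions as sorted/sorted2 use them
def before2 (a b : List (String × String)) : Bool :=
  decide (keyA1 a < keyA1 b) || (!decide (keyA1 b < keyA1 a) && decide (keyA2 a < keyA2 b))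

def beforeU (a b : List (String × String)) : Bool := decide (keyAU b < keyAU a)

-- B's comparison on the live side, expressed on sessions
def beforeB2 (a b : List (String × String)) : Bool := keyLtB (keyA1 a, keyA2 a) (keyA1 b, keyA2 b)

def tagL (s : List (String × String)) : (Bool × String) × List (String × String) := ((keyA1 s, keyA2 s), s)
def tagU (s : List (String × String)) : String × List (String × String) := (keyAU s, s)

def livePredB (s : List (String × String)) : Bool := !orchB s && isLiveSt s
def blockedPredB (s : List (String × String)) : Bool := !orchB s && !isLiveSt s && isBlockedSt s

theorem head?_insertBy {α : Type} (before : α → α → Bool) (x : α) (acc : List α) :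
    (PySem.List.insertBy before x acc).head? = optMin before acc.head? x := by
  cases acc with
  | nil => rfl
  | cons y ys =>
    show (if before x y then x :: y :: ys else y :: PySem.List.insertBy before x ys).head?
        = if before x y then some x else some y
    split <;> rfl

theorem head?_foldl_insertBy {α : Type} (before : α → α → Bool) (l : List α) (acc : List α) :
    (l.foldl (fun a x => PySem.List.insertBy before x a) acc).head? = l.foldl (optMin before) acc.head? := by
  induction l generalizing acc with
  | nil => rfl
  | cons x t ih => simp only [List.foldl_cons, ih, head?_insertBy]

theorem foldl_optMin_some {α : Type} (before : α → α → Bool) (l : List α) (b : α) :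
    ∃ m, l.foldl (optMin before) (some b) = some m := by
  induction l generalizing b with
  | nil => exact ⟨b, rfl⟩
  | cons x t ih =>
    simp only [List.foldl_cons, optMin]
    split <;> apply ih

theorem before2_eq (a b : List (String × String)) : beforeB2 a b = before2 a b := by
  unfold beforeB2 before2 keyLtB
  cases h1 : keyA1 a <;> cases h2 : keyA1 b <;> simp

theorem blocked_not_live (s : List (String × String)) (h : isBlockedSt s = true) : isLiveSt s = false := by
  unfold isBlockedSt at h
  unfold isLiveSt
  cases hst : pvGet s "state" with
  | none => simp
  | some v =>
    simp only [hst, Option.some.injEq, beq_iff_eq, Bool.or_eq_true] at h ⊢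
    rcases h with (h | h) | h <;> subst h <;> decide

theorem livePredB_eq (s : List (String × String)) : livePredB s = liveA s := by
  unfold livePredB liveA orchB isLiveSt
  rw [Bool.eq_iff_iff]
  simp only [Bool.and_eq_true, Bool.or_eq_true, Bool.not_eq_true', Bool.or_eq_false_iff,
    beq_iff_eq, beq_eq_false_iff_ne, decide_eq_true_eq, ne_eq]
  tauto

theorem blockedPredB_eq (s : List (String × String)) : blockedPredB s = blockedA s := by
  have himp := blocked_not_live s
  unfold isBlockedSt isLiveSt at himp
  unfold blockedPredB blockedA orchB isBlockedSt isLiveSt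
  rw [Bool.eq_iff_iff]
  simp only [Bool.and_eq_true, Bool.or_eq_true, Bool.not_eq_true', Bool.or_eq_false_iff,
    beq_iff_eq, beq_eq_false_iff_ne, decide_eq_true_eq, ne_eq] at himp ⊢
  tauto

-- B's fused loop is the pair of first-wins scans over A's two filtered lists
theorem foldB_decompose (l : List (List (String × String)))
    (oL oB : Option (List (String × String))) :
    l.foldl stepB (oL.map tagL, oB.map tagU) =
      (((l.filter livePredB).foldl (optMin beforeB2) oL).map tagL,
       ((l.filter blockedPredB).foldl (optMin beforeU) oB).map tagU) := by
  induction l generalizing oL oB with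
  | nil => rfl
  | cons x t ih =>
    simp only [List.foldl_cons, List.filter_cons]
    by_cases horch : orchB x = true
    · have h1 : livePredB x = false := by simp [livePredB, horch]
      have h2 : blockedPredB x = false := by simp [blockedPredB, horch]
      have hstep : stepB (oL.map tagL, oB.map tagU) x = (oL.map tagL, oB.map tagU) := by
        unfold stepB; simp [horch]
      rw [hstep, h1, h2]
      simp only [Bool.false_eq_true, if_false]
      exact ih oL oB
    · have horch' : orchB x = false := by simpa using horch
      by_cases hl : isLiveSt x = true
      · have h1 : livePredB x = true := by simp [livePredB, horch', hl]
        have h2 : blockedPredB x = false := by simp [blockedPredB, hl]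
        have hstep : stepB (oL.map tagL, oB.map tagU) x = ((optMin beforeB2 oL x).map tagL, oB.map tagU) := by
          unfold stepB
          simp only [horch', hl, Bool.false_eq_true, if_false, if_true]
          cases oL with
          | none => rfl
          | some b =>
            simp only [Option.map_some, optMin]
            have : keyLtB (decide (pvGet x "state" ≠ some "running"), (pvGet x "created_at").getD "") (tagL b).1 = beforeB2 x b := rfl
            rw [this]
            split <;> rfl
        rw [hstep, h1, h2]
        simp only [Bool.false_eq_true, if_false]
        exact ih (optMin beforeB2 oL x) oB
      · have hl' : isLiveSt x = false := by simpa using hl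
        have h1 : livePredB x = false := by simp [livePredB, hl']
        by_cases hb : isBlockedSt x = true
        · have h2 : blockedPredB x = true := by simp [blockedPredB, horch', hl', hb]
          have hstep : stepB (oL.map tagL, oB.map tagU) x = (oL.map tagL, (optMin beforeU oB x).map tagU) := by
            unfold stepB
            simp only [horch', hl', hb, Bool.false_eq_true, if_false, if_true]
            cases oB with
            | none => rfl
            | some b =>
              simp only [Option.map_some, optMin]
              have : decide ((tagU b).1 < (pvGet x "updated_at").getD "") = beforeU x b := rfl
              rw [this]
              split <;> rfl
          rw [hstep, h1, h2]
          simp only [Bool.false_eq_true, if_false]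
          exact ih oL (optMin beforeU oB x)
        · have hb' : isBlockedSt x = false := by simpa using hb
          have h2 : blockedPredB x = false := by simp [blockedPredB, hb']
          have hstep : stepB (oL.map tagL, oB.map tagU) x = (oL.map tagL, oB.map tagU) := by
            unfold stepB
            simp [horch', hl', hb']
          rw [hstep, h1, h2]
          simp only [Bool.false_eq_true, if_false]
          exact ih oL oB

theorem active_pass_alt_eq (sessions : List (List (String × String))) :
    active_pass_alt sessions =
      match (sessions.filter liveA).foldl (optMin before2) none with
      | some m => some m
      | none =>
        match (sessions.filter blockedA).foldl (optMin beforeU) none with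
        | some m => some m
        | none => none := by
  unfold active_pass_alt
  have h := foldB_decompose sessions none none
  simp only [Option.map_none] at h
  rw [h]
  have hfl : sessions.filter livePredB = sessions.filter liveA :=
    List.filter_congr (fun x _ => livePredB_eq x)
  have hfb : sessions.filter blockedPredB = sessions.filter blockedA :=
    List.filter_congr (fun x _ => blockedPredB_eq x)
  have hb2 : optMin beforeB2 = optMin before2 := by
    funext o x
    cases o with
    | none => rfl
    | some b => simp [optMin, before2_eq]
  rw [hfl, hfb, hb2]
  cases h1 : (sessions.filter liveA).foldl (optMin before2) none with
  | some m => rfl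
  | none =>
    cases h2 : (sessions.filter blockedA).foldl (optMin beforeU) none with
    | some m => rfl
    | none => rfl

theorem sorted2_head (l : List (List (String × String))) :
    (PySem.List.sorted2 l keyA1 keyA2 false).head? = l.foldl (optMin before2) none := by
  unfold PySem.List.sorted2
  simp only [if_neg (by simp : ¬ (false = true))]
  exact head?_foldl_insertBy _ l []

theorem sortedU_head (l : List (List (String × String))) :
    (PySem.List.sorted l keyAU true).head? = l.foldl (optMin beforeU) none := by
  rw [PySem.List.sorted_rev_eq_foldl_insertBy]
  exact head?_foldl_insertBy _ l []

-- ===== VERDICT (by name: the statement is the Claim_ definition above) =====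
theorem active_pass_spec : Claim_equal_active_pass := by
  intro sessions _
  unfold Spec_active_pass
  rw [active_pass_alt_eq]
  unfold active_pass
  by_cases hl : sessions.filter liveA = []
  · by_cases hb : sessions.filter blockedA = []
    · simp [hl, hb]
    · obtain ⟨x, t, hx⟩ : ∃ x t, sessions.filter blockedA = x :: t := by
        cases h : sessions.filter blockedA with
        | nil => exact absurd h hb
        | cons a b => exact ⟨a, b, rfl⟩
      simp only [hl, hx, List.isEmpty_nil, List.isEmpty_cons, Bool.not_true,
        Bool.false_eq_true, if_false, List.foldl_nil]
      rw [sortedU_head]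
      obtain ⟨m, hm⟩ := foldl_optMin_some beforeU t x
      rw [List.foldl_cons, show optMin beforeU none x = some x from rfl, hm]
  · obtain ⟨x, t, hx⟩ : ∃ x t, sessions.filter liveA = x :: t := by
      cases h : sessions.filter liveA with
      | nil => exact absurd h hl
      | cons a b => exact ⟨a, b, rfl⟩
    simp only [hx, List.isEmpty_cons, Bool.not_false, if_true]
    rw [sorted2_head]
    obtain ⟨m, hm⟩ := foldl_optMin_some before2 t x
    rw [List.foldl_cons, show optMin before2 none x = some x from rfl, hm]
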